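-- pv_equiv track=rewrite | github.com/joapolarbear/dpro | trace_utils.py | _parse_tf_layer_names
-- ===== SOURCE A (Python) =====
-- DEL = "->"
--
-- DDEL = "~>"
--
-- def parse_op_name(name):
--     if DEL in name:
--         name = name.split(DEL)[1]
--     if DDEL in name:
--         name = name.split(DDEL)[0]
--     if "." in name:
--         name = name.split(".")[1]
--     # name_split = name.split("_")
--     # if name_split[-1] in ["gamma", "beta", "weight", "bias"]:
--     #     return "_".join(name_split[:-1])
--     # else:
--     #     return name
--     return name
--
-- def _parse_tf_layer_names(name):
--     layer_names = []
--     if "+" in name: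
--         for _name in name.split("+"):
--             layer_names += _parse_tf_layer_names(_name)
--         return layer_names
--     op_name_split = parse_op_name(name).split("/")
--     op_type = "FW"
--     idx = 0
--     if op_name_split[idx] == "gradients":
--         op_type = "BW"
--         idx += 1
--     if op_name_split[idx].lower() in ["inception_v3", "resnet50", "vgg16", "bert"]:
--         idx += 1
--
--     if idx >= len(op_name_split) - 2:
--         layer_names.append("{}.{}".format(op_type, op_name_split[idx]))
--     elif op_name_split[idx-1].lower() == "bert":
--         layer_names.append(
--             "{}.{}/{}".format(op_type, op_name_split[idx], op_name_split[idx+1]))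
--     else:
--         layer_names.append("{}.{}".format(op_type, op_name_split[idx]))
--     return layer_names
-- ===== SOURCE B (Python) =====
-- DEL = "->"
--
-- DDEL = "~>"
--
-- def parse_op_name(name):
--     if DEL in name:
--         name = name.split(DEL)[1]
--     if DDEL in name:
--         name = name.split(DDEL)[0]
--     if "." in name:
--         name = name.split(".")[1]
--     return name
--
-- _MODELS = ("inception_v3", "resnet50", "vgg16", "bert")
--
-- def _part_labels(part):
--     segs = parse_op_name(part).split("/")
--     idx = 1 if segs[0] == "gradients" else 0
--     op_type = "BW" if idx else "FW"
--     if segs[idx].lower() in _MODELS: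
--         idx += 1
--     if idx < len(segs) - 2 and segs[idx - 1].lower() == "bert":
--         return ["{}.{}/{}".format(op_type, segs[idx], segs[idx + 1])]
--     return ["{}.{}".format(op_type, segs[idx])]
--
-- def _parse_tf_layer_names(name):
--     labels = []
--     for part in name.split("+"):
--         labels.extend(_part_labels(part))
--     return labels
-- ===== Notes on version B (the rewrite author's own statement) =====
-- stated objective: simpler
-- what changed: Replaces the recursive '+'-splitting with one iterative pass over name.split('+') feeding a per-part helper, and merges A's duplicated first/third label branches into a single two-way branch.
-- outside the precondition, e.g. on _parse_tf_layer_names('gradients'): A raises IndexError, B raises IndexError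
import Mathlib
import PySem

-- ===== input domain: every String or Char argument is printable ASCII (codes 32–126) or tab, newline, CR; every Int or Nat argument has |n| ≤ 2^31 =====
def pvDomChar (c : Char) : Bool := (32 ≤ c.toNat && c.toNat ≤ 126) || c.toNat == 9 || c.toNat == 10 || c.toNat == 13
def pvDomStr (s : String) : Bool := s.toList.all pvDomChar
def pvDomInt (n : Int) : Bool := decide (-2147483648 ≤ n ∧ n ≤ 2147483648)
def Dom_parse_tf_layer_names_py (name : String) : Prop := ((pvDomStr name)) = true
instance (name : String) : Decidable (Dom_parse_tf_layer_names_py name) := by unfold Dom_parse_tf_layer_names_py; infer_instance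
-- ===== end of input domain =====

-- B replaces A's recursion on '+' by one iterative pass over name.split('+') with a per-part
-- helper and merges A's duplicated label branches (objective: simpler).  Return values only;
-- neither program mutates its argument.

-- ===== PORT A =====
-- name.split(sep) for a nonempty literal sep (never raises)
def pvStrSplit (s sep : String) : List String := (PySem.Str.split? s sep).getD []
-- xs[i] for Python list indexing; the "" default is never reached on inputs admitted by Pre_
def pvSeg (l : List String) (i : Int) : String := (PySem.List.pyGet? l i).getD ""

def parse_op_name_py (name : String) : String :=
  let name := if PySem.Str.isIn "->" name then pvSeg (pvStrSplit name "->") 1 else name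
  let name := if PySem.Str.isIn "~>" name then pvSeg (pvStrSplit name "~>") 0 else name
  if PySem.Str.isIn "." name then pvSeg (pvStrSplit name ".") 1 else name

-- termination facts for A's recursion (cited by decreasing_by): splitOn over a single char
-- is List.splitOnP, whose parts are strictly shorter when the separator occurs
lemma pv_go_eq (c : Char) : ∀ (fuel : Nat) (l cur : List Char) (acc : List (List Char)), l.length < fuel →
    PySem.Chars.splitOn.go [c] fuel l cur acc
      = acc.reverse ++ (l.splitOnP (· == c)).modifyHead (cur.reverse ++ ·) := by
  intro fuel
  induction fuel with
  | zero => intro l cur acc h; omega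
  | succ fuel ih =>
    intro l cur acc h
    cases l with
    | nil =>
      simp [PySem.Chars.splitOn.go, List.splitOnP_nil]
    | cons x rest =>
      simp only [PySem.Chars.splitOn.go]
      by_cases hx : x = c
      · subst hx
        have hpre : [x].isPrefixOf (x :: rest) = true := by simp [List.isPrefixOf]
        rw [if_pos hpre]
        simp only [List.length_cons, List.length_nil, List.drop_succ_cons, List.drop_zero]
        rw [ih rest [] (cur.reverse :: acc) (by simpa using h)]
        simp [List.splitOnP_cons]
        cases hsp : rest.splitOnP (· == x) with
        | nil => simp
        | cons q qs => simp
      · have hpre : [c].isPrefixOf (x :: rest) = false := by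
          simp [List.isPrefixOf]; exact fun hcx => (hx hcx.symm).elim
        rw [if_neg (by simp [hpre])]
        rw [ih rest (x :: cur) acc (by simpa using h)]
        rw [List.splitOnP_cons]
        simp only [beq_iff_eq, if_neg hx]
        cases hsp : rest.splitOnP (· == c) with
        | nil => simp
        | cons q qs => simp

lemma pv_splitOn_single (c : Char) (l : List Char) :
    PySem.Chars.splitOn l [c] = l.splitOnP (· == c) := by
  unfold PySem.Chars.splitOn
  rw [pv_go_eq c (l.length + 1) l [] [] (by omega)]
  cases hsp : l.splitOnP (· == c) with
  | nil => exact absurd hsp (List.splitOnP_ne_nil _ _)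
  | cons q qs => simp

lemma pv_strSplit_plus (s : String) :
    pvStrSplit s "+" = (s.toList.splitOnP (· == '+')).map String.ofList := by
  have : ("+" : String).toList = ['+'] := by decide
  simp [pvStrSplit, PySem.Str.split?, PySem.Chars.split?, this, pv_splitOn_single]

lemma pv_splitOnP_mem_len {α : Type} (p : α → Bool) :
    ∀ (l : List α), ∀ q ∈ l.splitOnP p, q.length ≤ l.length := by
  intro l
  induction l with
  | nil => intro q hq; simp [List.splitOnP_nil] at hq; simp [hq]
  | cons a as ih =>
    intro q hq
    rw [List.splitOnP_cons] at hq
    by_cases ha : p a = true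
    · rw [if_pos ha] at hq
      rw [List.mem_cons] at hq
      rcases hq with hq | hq
      · simp [hq]
      · calc q.length ≤ as.length := ih q hq
          _ ≤ (a :: as).length := by simp
    · rw [if_neg ha] at hq
      cases hsp : as.splitOnP p with
      | nil => exact absurd hsp (List.splitOnP_ne_nil _ _)
      | cons r rs =>
        rw [hsp] at hq
        simp only [List.modifyHead] at hq
        rw [List.mem_cons] at hq
        rcases hq with hq | hq
        · subst hq
          have := ih r (by rw [hsp]; exact List.mem_cons_self)
          simp at this ⊢; omega
        · have := ih q (by rw [hsp]; exact List.mem_cons_of_mem _ hq)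
          simp at this ⊢; omega

lemma pv_splitOnP_mem_len_lt {α : Type} (p : α → Bool) :
    ∀ (l : List α), (∃ a ∈ l, p a = true) → ∀ q ∈ l.splitOnP p, q.length < l.length := by
  intro l
  induction l with
  | nil => rintro ⟨a, ha, -⟩; cases ha
  | cons a as ih =>
    rintro ⟨b, hb, hpb⟩ q hq
    rw [List.splitOnP_cons] at hq
    by_cases ha : p a = true
    · rw [if_pos ha] at hq
      rw [List.mem_cons] at hq
      rcases hq with hq | hq
      · simp [hq]
      · have := pv_splitOnP_mem_len p as q hq
        simp at this ⊢; omega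
    · have hbas : b ∈ as := by
        rw [List.mem_cons] at hb
        rcases hb with rfl | hb
        · exact absurd hpb ha
        · exact hb
      rw [if_neg ha] at hq
      cases hsp : as.splitOnP p with
      | nil => exact absurd hsp (List.splitOnP_ne_nil _ _)
      | cons r rs =>
        rw [hsp] at hq
        simp only [List.modifyHead] at hq
        rw [List.mem_cons] at hq
        rcases hq with hq | hq
        · subst hq
          have := ih ⟨b, hbas, hpb⟩ r (by rw [hsp]; exact List.mem_cons_self)
          simp at this ⊢; omega
        · have := ih ⟨b, hbas, hpb⟩ q (by rw [hsp]; exact List.mem_cons_of_mem _ hq)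
          simp at this ⊢; omega

lemma pv_part_len_lt (s p : String) (hplus : PySem.Str.isIn "+" s = true)
    (hp : p ∈ pvStrSplit s "+") : p.toList.length < s.toList.length := by
  rw [pv_strSplit_plus] at hp
  rcases List.mem_map.mp hp with ⟨q, hq, rfl⟩
  have hmem : '+' ∈ s.toList := by
    have := (PySem.Str.isIn_iff_infix "+" s).mp hplus
    have h2 : ['+'] <:+: s.toList := by
      have : ("+" : String).toList = ['+'] := by decide
      rwa [this] at *
    exact (List.singleton_infix_iff _ _).mp h2
  have := pv_splitOnP_mem_len_lt (· == '+') s.toList ⟨'+', hmem, by simp⟩ q hq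
  simpa using this

def parse_tf_layer_names_py (name : String) : List String :=
  if h : PySem.Str.isIn "+" name = true then
    (pvStrSplit name "+").attach.foldl
      (fun acc p => acc ++ parse_tf_layer_names_py p.1) []
  else
    let op_name_split := pvStrSplit (parse_op_name_py name) "/"
    let op_type := if pvSeg op_name_split 0 = "gradients" then "BW" else "FW"
    let idx : Int := if pvSeg op_name_split 0 = "gradients" then 1 else 0
    let idx := if PySem.Str.lower (pvSeg op_name_split idx)
                  ∈ ["inception_v3", "resnet50", "vgg16", "bert"] then idx + 1 else idx
    if idx ≥ (op_name_split.length : Int) - 2 then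
      [op_type ++ "." ++ pvSeg op_name_split idx]
    else if PySem.Str.lower (pvSeg op_name_split (idx - 1)) = "bert" then
      [op_type ++ "." ++ pvSeg op_name_split idx ++ "/" ++ pvSeg op_name_split (idx + 1)]
    else
      [op_type ++ "." ++ pvSeg op_name_split idx]
termination_by name.toList.length
decreasing_by exact pv_part_len_lt name p.1 h p.2

-- ===== PORT B =====
def pvMODELS : List String := ["inception_v3", "resnet50", "vgg16", "bert"]

def part_labels_alt (part : String) : List String :=
  let segs := pvStrSplit (parse_op_name_py part) "/"
  let idx : Int := if pvSeg segs 0 = "gradients" then 1 else 0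
  let op_type := if idx ≠ 0 then "BW" else "FW"
  let idx := if PySem.Str.lower (pvSeg segs idx) ∈ pvMODELS then idx + 1 else idx
  if idx < (segs.length : Int) - 2 ∧ PySem.Str.lower (pvSeg segs (idx - 1)) = "bert" then
    [op_type ++ "." ++ pvSeg segs idx ++ "/" ++ pvSeg segs (idx + 1)]
  else
    [op_type ++ "." ++ pvSeg segs idx]

def parse_tf_layer_names_py_alt (name : String) : List String :=
  (pvStrSplit name "+").foldl (fun acc part => acc ++ part_labels_alt part) []

-- ===== PRECONDITION & SPEC =====
-- Pre_ excludes exactly the inputs on which Python A raises IndexError: a '+'-free part whose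
-- '/'-segments are exhausted by the leading 'gradients'/model-name prefix (e.g. "gradients").
def Pre_parse_tf_layer_names_py (name : String) : Prop :=
  ∀ p ∈ pvStrSplit name "+",
    (let segs := pvStrSplit (parse_op_name_py p) "/"
     let i : Int := if pvSeg segs 0 = "gradients" then 1 else 0
     let i := if PySem.Str.lower (pvSeg segs i)
                 ∈ ["inception_v3", "resnet50", "vgg16", "bert"] then i + 1 else i
     i < (segs.length : Int))
instance (name : String) : Decidable (Pre_parse_tf_layer_names_py name) := by
  unfold Pre_parse_tf_layer_names_py; infer_instance

def pvWitness_parse_tf_layer_names_py : String := "gradients/bert/a/b+x/y"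

def Spec_parse_tf_layer_names_py (name : String) (out : List String) : Prop :=
  out = parse_tf_layer_names_py_alt name
instance (name : String) (out : List String) : Decidable (Spec_parse_tf_layer_names_py name out) := by
  unfold Spec_parse_tf_layer_names_py; infer_instance

-- ===== CLAIM (what is proved, stated in full; the proofs are below) =====
def Claim_equal_parse_tf_layer_names_py : Prop :=
  ∀ (name : String), Dom_parse_tf_layer_names_py name → Pre_parse_tf_layer_names_py name →
    Spec_parse_tf_layer_names_py name (parse_tf_layer_names_py name)

-- ===== LEMMAS AND PROOFS =====
lemma pv_splitOnP_mem_not {α : Type} (p : α → Bool) :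
    ∀ (l : List α), ∀ q ∈ l.splitOnP p, ∀ x ∈ q, ¬ p x = true := by
  intro l
  induction l with
  | nil => intro q hq; simp [List.splitOnP_nil] at hq; simp [hq]
  | cons a as ih =>
    intro q hq
    rw [List.splitOnP_cons] at hq
    by_cases ha : p a = true
    · rw [if_pos ha] at hq
      rw [List.mem_cons] at hq
      rcases hq with hq | hq
      · simp [hq]
      · exact ih q hq
    · rw [if_neg ha] at hq
      cases hsp : as.splitOnP p with
      | nil => exact absurd hsp (List.splitOnP_ne_nil _ _)
      | cons r rs =>
        rw [hsp] at hq
        simp only [List.modifyHead] at hq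
        rw [List.mem_cons] at hq
        rcases hq with hq | hq
        · subst hq
          intro x hx
          rw [List.mem_cons] at hx
          rcases hx with rfl | hx
          · exact ha
          · exact ih r (by rw [hsp]; exact List.mem_cons_self) x hx
        · exact ih q (by rw [hsp]; exact List.mem_cons_of_mem _ hq)

lemma pv_part_no_plus (s p : String) (hp : p ∈ pvStrSplit s "+") :
    PySem.Str.isIn "+" p = false := by
  rw [pv_strSplit_plus] at hp
  rcases List.mem_map.mp hp with ⟨q, hq, rfl⟩
  have hnot : '+' ∉ q := fun hx =>
    pv_splitOnP_mem_not (· == '+') s.toList q hq '+' hx (by simp)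
  have : ¬ (("+" : String).toList <:+: (String.ofList q).toList) := by
    have h1 : ("+" : String).toList = ['+'] := by decide
    rw [h1, String.toList_ofList]
    exact fun h => hnot ((List.singleton_infix_iff _ _).mp h)
  rw [PySem.Str.isIn]
  exact (PySem.Chars.isIn_eq_false_iff _ _).mpr this

lemma pv_split_no_plus (s : String) (h : PySem.Str.isIn "+" s = false) :
    pvStrSplit s "+" = [s] := by
  rw [pv_strSplit_plus]
  have hnot : '+' ∉ s.toList := by
    intro hx
    have : PySem.Str.isIn "+" s = true := by
      simp only [PySem.Str.isIn_eq]
      apply (PySem.Chars.isIn_iff_infix _ _).mpr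
      have h1 : ("+" : String).toList = ['+'] := by decide
      rw [h1]; exact (List.singleton_infix_iff _ _).mpr hx
    rw [this] at h; cases h
  rw [List.splitOnP_eq_single _ _ (fun x hx => by simp; rintro rfl; exact hnot hx)]
  simp [String.ofList_toList]

lemma pv_branch (idx L : Int) (b : Prop) [Decidable b] (X Y : List String) :
    (if idx ≥ L - 2 then X else if b then Y else X)
      = (if idx < L - 2 ∧ b then Y else X) := by
  by_cases h1 : idx ≥ L - 2
  · rw [if_pos h1, if_neg (fun hc => by omega)]
  · rw [if_neg h1]
    by_cases hb : b
    · rw [if_pos hb, if_pos ⟨by omega, hb⟩]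
    · rw [if_neg hb, if_neg (fun hc => hb hc.2)]

lemma pv_base_eq (name : String) (h : ¬ PySem.Str.isIn "+" name = true) :
    parse_tf_layer_names_py name = part_labels_alt name := by
  rw [parse_tf_layer_names_py.eq_def, dif_neg h, part_labels_alt]
  simp only [pvMODELS]
  by_cases hg : pvSeg (pvStrSplit (parse_op_name_py name) "/") 0 = "gradients"
  · simp only [if_pos hg, ne_eq, one_ne_zero, not_false_eq_true, if_true]
    exact pv_branch _ _ _ _ _
  · simp only [if_neg hg, ne_eq, not_true, if_false]
    exact pv_branch _ _ _ _ _

lemma pv_A_eq_flatMap (name : String) (h : PySem.Str.isIn "+" name = true) :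
    parse_tf_layer_names_py name
      = (pvStrSplit name "+").flatMap parse_tf_layer_names_py := by
  rw [parse_tf_layer_names_py.eq_def, dif_pos h]
  rw [PySem.List.foldl_append_eq_flatMap]
  simp [List.flatMap_def]

-- ===== VERDICT (by name: the statement is the Claim_ definition above) =====
theorem parse_tf_layer_names_py_spec : Claim_equal_parse_tf_layer_names_py := by
  intro name _dom _pre
  show parse_tf_layer_names_py name = parse_tf_layer_names_py_alt name
  rw [parse_tf_layer_names_py_alt, PySem.List.foldl_append_eq_flatMap, List.nil_append]
  by_cases h : PySem.Str.isIn "+" name = true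
  · rw [pv_A_eq_flatMap name h]
    have hmap : (pvStrSplit name "+").map parse_tf_layer_names_py
        = (pvStrSplit name "+").map part_labels_alt :=
      List.map_congr_left fun p hp =>
        pv_base_eq p (by rw [pv_part_no_plus name p hp]; simp)
    rw [List.flatMap_def, List.flatMap_def, hmap]
  · rw [pv_split_no_plus name (by simpa using h)]
    simp [pv_base_eq name h]
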